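-- pv_equiv track=rewrite | github.com/pmbaumgartner/remerge-mwe | scripts/mwe_eval/match.py | _decode_maximal_non_overlapping
-- ===== SOURCE A (Python) =====
-- def _decode_longest_per_start(spans: set[tuple[int, int]]) -> set[tuple[int, int]]:
--     best_by_start: dict[int, tuple[int, int]] = {}
--     for start, end in spans:
--         current = best_by_start.get(start)
--         length = end - start
--         if current is None:
--             best_by_start[start] = (start, end)
--             continue
--         current_length = current[1] - current[0]
--         if length > current_length or (length == current_length and end > current[1]):
--             best_by_start[start] = (start, end)
--     return set(best_by_start.values())
--
-- def _decode_maximal_non_overlapping(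
--     spans: set[tuple[int, int]],
-- ) -> set[tuple[int, int]]:
--     candidates = sorted(
--         _decode_longest_per_start(spans), key=lambda span: (span[0], -span[1])
--     )
--     selected: list[tuple[int, int]] = []
--
--     current_end = -1
--     for span in candidates:
--         start, end = span
--         if start < current_end:
--             continue
--         selected.append(span)
--         current_end = end
--
--     return set(selected)
-- ===== SOURCE B (Python) =====
-- def _decode_maximal_non_overlapping(
--     spans: set[tuple[int, int]],
-- ) -> set[tuple[int, int]]:
--     # Sorting by (start, -end) puts the longest span of each start first, so a
--     # single greedy scan suffices: skip a span if it starts inside the current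
--     # selection or repeats the start of the last selected span.
--     selected: list[tuple[int, int]] = []
--     current_end = -1
--     last_start = None
--     for start, end in sorted(spans, key=lambda sp: (sp[0], -sp[1])):
--         if start < current_end or start == last_start:
--             continue
--         selected.append((start, end))
--         current_end = end
--         last_start = start
--     return set(selected)
-- ===== Notes on version B (the rewrite author's own statement) =====
-- stated objective: simpler
-- what changed: B drops A's separate dict-building longest-per-start pass entirely: it sorts the spans by (start, -end) once and does a single greedy scan in which the longest span of each start comes first, skipping later same-start duplicates and overlapping spans in the same test.
import Mathlib
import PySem

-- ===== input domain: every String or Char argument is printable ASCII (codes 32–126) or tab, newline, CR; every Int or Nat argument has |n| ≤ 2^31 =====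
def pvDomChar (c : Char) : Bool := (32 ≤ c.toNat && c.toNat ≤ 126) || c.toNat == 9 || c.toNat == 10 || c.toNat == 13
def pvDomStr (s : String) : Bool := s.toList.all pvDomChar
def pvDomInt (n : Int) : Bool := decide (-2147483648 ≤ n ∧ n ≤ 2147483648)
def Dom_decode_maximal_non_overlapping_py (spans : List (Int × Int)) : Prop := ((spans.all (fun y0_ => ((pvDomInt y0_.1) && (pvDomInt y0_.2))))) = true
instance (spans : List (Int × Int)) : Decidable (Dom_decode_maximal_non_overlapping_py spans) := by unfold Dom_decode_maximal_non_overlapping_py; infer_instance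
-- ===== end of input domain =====

-- B replaces A's dict-building longest-per-start pass by a single greedy scan of the
-- spans sorted by (start, -end); objective: simpler (one fused pass, no dictionary).

-- ===== PORT A =====
-- helper _decode_longest_per_start: dict best_by_start, then set of its values
def pvStepBest (d : PySem.Dict Int (Int × Int)) (sp : Int × Int) : PySem.Dict Int (Int × Int) :=
  match d.get? sp.1 with
  | none => d.insert sp.1 (sp.1, sp.2)
  | some cur =>
    if sp.2 - sp.1 > cur.2 - cur.1 ∨ (sp.2 - sp.1 = cur.2 - cur.1 ∧ sp.2 > cur.2)
    then d.insert sp.1 (sp.1, sp.2) else d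

def decode_longest_per_start (spans : List (Int × Int)) : List (Int × Int) :=
  PySem.Set.ofList (spans.foldl pvStepBest PySem.Dict.empty).values

-- greedy loop body of _decode_maximal_non_overlapping (state: selected, current_end)
def pvStepA (st : List (Int × Int) × Int) (sp : Int × Int) : List (Int × Int) × Int :=
  if sp.1 < st.2 then st else (st.1 ++ [sp], sp.2)

def decode_maximal_non_overlapping_py (spans : List (Int × Int)) : List (Int × Int) :=
  let candidates :=
    PySem.List.sorted2 (decode_longest_per_start spans) (fun sp => sp.1) (fun sp => -sp.2)
  PySem.Set.ofList (candidates.foldl pvStepA ([], -1)).1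

-- ===== PORT B =====
-- loop body of B (state: selected, current_end, last_start; 'start == last_start'
-- with last_start = None is False, hence the Option comparison)
def pvStepB (st : List (Int × Int) × Int × Option Int) (sp : Int × Int) :
    List (Int × Int) × Int × Option Int :=
  if sp.1 < st.2.1 ∨ some sp.1 = st.2.2 then st else (st.1 ++ [sp], sp.2, some sp.1)

def decode_maximal_non_overlapping_py_alt (spans : List (Int × Int)) : List (Int × Int) :=
  let srt := PySem.List.sorted2 spans (fun sp => sp.1) (fun sp => -sp.2)
  PySem.Set.ofList (srt.foldl pvStepB ([], -1, none)).1

-- ===== PRECONDITION & SPEC =====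
def Spec_decode_maximal_non_overlapping_py (spans : List (Int × Int)) (out : List (Int × Int)) : Prop := out = decode_maximal_non_overlapping_py_alt spans
instance (spans : List (Int × Int)) (out : List (Int × Int)) : Decidable (Spec_decode_maximal_non_overlapping_py spans out) := by unfold Spec_decode_maximal_non_overlapping_py; infer_instance

-- ===== CLAIM (what is proved, stated in full; the proofs are below) =====
def Claim_equal_decode_maximal_non_overlapping_py : Prop := ∀ (spans : List (Int × Int)), Dom_decode_maximal_non_overlapping_py spans → Spec_decode_maximal_non_overlapping_py spans (decode_maximal_non_overlapping_py spans)

-- ===== LEMMAS AND PROOFS =====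

-- "first per start": keeps the first element of each start group
def pvFps : List (Int × Int) → List (Int × Int)
  | [] => []
  | x :: ys => x :: pvFps (ys.filter (fun y => y.1 ≠ x.1))
termination_by l => l.length
decreasing_by
  simp only [List.length_unattach]
  exact Nat.lt_succ_of_le (le_trans (List.length_filter_le _ _) (by simp))

lemma pvFps_nil : pvFps [] = [] := by rw [pvFps]

lemma pvFps_cons (x : Int × Int) (ys : List (Int × Int)) :
    pvFps (x :: ys) = x :: pvFps (ys.filter (fun y => y.1 ≠ x.1)) := by rw [pvFps]

-- the (start, -end) sort order, as a ≤-relation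
def pvLexLe (a b : Int × Int) : Prop := a.1 < b.1 ∨ (a.1 = b.1 ∧ b.2 ≤ a.2)

-- the Bool comparator sorted2 uses for key (start, -end)
def pvLt (a b : Int × Int) : Bool :=
  decide (a.1 < b.1) || (!decide (b.1 < a.1) && decide (-a.2 < -b.2))

lemma pvLt_false_iff (a b : Int × Int) : pvLt a b = false ↔ pvLexLe b a := by
  simp only [pvLt, pvLexLe, Bool.or_eq_false_iff, Bool.and_eq_false_iff, decide_eq_false_iff_not,
    Bool.not_eq_false', decide_eq_true_eq]
  omega

lemma pvLt_true_le (a b : Int × Int) (h : pvLt a b = true) : pvLexLe a b := by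
  simp only [pvLt, Bool.or_eq_true, Bool.and_eq_true, decide_eq_true_eq, Bool.not_eq_true',
    decide_eq_false_iff_not] at h
  simp only [pvLexLe]; omega

lemma pvLexLe_trans (a b c : Int × Int) (h1 : pvLexLe a b) (h2 : pvLexLe b c) : pvLexLe a c := by
  simp only [pvLexLe] at *; omega

lemma pvInsertBy_pairwise (x : Int × Int) (ys : List (Int × Int))
    (h : ys.Pairwise pvLexLe) :
    (PySem.List.insertBy pvLt x ys).Pairwise pvLexLe := by
  induction ys with
  | nil => simp [PySem.List.insertBy]
  | cons y ys ih =>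
    rw [List.pairwise_cons] at h
    by_cases hb : pvLt x y = true
    · rw [show PySem.List.insertBy pvLt x (y :: ys) = x :: y :: ys from by
        simp [PySem.List.insertBy, hb]]
      refine List.Pairwise.cons ?_ (List.Pairwise.cons h.1 h.2)
      intro z hz
      rcases List.mem_cons.mp hz with rfl | hz
      · exact pvLt_true_le _ _ hb
      · exact pvLexLe_trans _ _ _ (pvLt_true_le _ _ hb) (h.1 z hz)
    · rw [show PySem.List.insertBy pvLt x (y :: ys) = y :: PySem.List.insertBy pvLt x ys from by
        simp [PySem.List.insertBy, hb]]
      refine List.Pairwise.cons ?_ (ih h.2)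
      intro z hz
      rcases (PySem.List.insertBy_mem_iff _ _ _ _).mp hz with rfl | hz
      · exact (pvLt_false_iff _ _).mp (Bool.eq_false_iff.mpr hb)
      · exact h.1 z hz

lemma pvSorted2_eq_foldl (xs : List (Int × Int)) :
    PySem.List.sorted2 xs (fun sp => sp.1) (fun sp => -sp.2)
      = xs.foldl (fun acc x => PySem.List.insertBy pvLt x acc) [] := rfl

lemma pvFoldl_insertBy_pairwise (xs acc : List (Int × Int)) (h : acc.Pairwise pvLexLe) :
    (xs.foldl (fun acc x => PySem.List.insertBy pvLt x acc) acc).Pairwise pvLexLe := by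
  induction xs generalizing acc with
  | nil => exact h
  | cons x xs ih => exact ih _ (pvInsertBy_pairwise x acc h)

lemma pvSorted2_pairwise (xs : List (Int × Int)) :
    (PySem.List.sorted2 xs (fun sp => sp.1) (fun sp => -sp.2)).Pairwise pvLexLe := by
  rw [pvSorted2_eq_foldl]
  exact pvFoldl_insertBy_pairwise xs [] List.Pairwise.nil

lemma pvFps_subset (l : List (Int × Int)) : ∀ z ∈ pvFps l, z ∈ l := by
  match l with
  | [] => simp [pvFps_nil]
  | x :: ys =>
    intro z hz
    rw [pvFps_cons] at hz
    rcases List.mem_cons.mp hz with rfl | hz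
    · exact List.mem_cons_self
    · exact List.mem_cons_of_mem _ (List.mem_of_mem_filter (pvFps_subset _ z hz))
termination_by l.length
decreasing_by exact Nat.lt_succ_of_le (List.length_filter_le _ _)

lemma pvFps_pairwise (ys : List (Int × Int)) (h : ys.Pairwise pvLexLe) :
    (pvFps ys).Pairwise (fun a b => a.1 < b.1) := by
  match ys with
  | [] => rw [pvFps_nil]; exact List.Pairwise.nil
  | x :: t =>
    rw [List.pairwise_cons] at h
    rw [pvFps_cons]
    refine List.Pairwise.cons ?_ (pvFps_pairwise _ (h.2.sublist List.filter_sublist))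
    intro z hz
    have hzf := pvFps_subset _ z hz
    have hne : z.1 ≠ x.1 := by
      have := List.of_mem_filter hzf
      simpa using this
    have hle := h.1 z (List.mem_of_mem_filter hzf)
    simp only [pvLexLe] at hle
    omega
termination_by ys.length
decreasing_by exact Nat.lt_succ_of_le (List.length_filter_le _ _)

lemma pvFps_mem (ys : List (Int × Int)) (h : ys.Pairwise pvLexLe) (x : Int × Int) :
    x ∈ pvFps ys ↔ x ∈ ys ∧ ∀ y ∈ ys, y.1 = x.1 → y.2 ≤ x.2 := by
  match ys with
  | [] => rw [pvFps_nil]; simp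
  | a :: t =>
    rw [List.pairwise_cons] at h
    rw [pvFps_cons]
    constructor
    · intro hx
      rcases List.mem_cons.mp hx with rfl | hx
      · refine ⟨List.mem_cons_self, ?_⟩
        intro y hy h1
        rcases List.mem_cons.mp hy with rfl | hy
        · exact le_refl _
        · have := h.1 y hy
          simp only [pvLexLe] at this; omega
      · have hrec := (pvFps_mem (t.filter (fun y => y.1 ≠ a.1))
          (h.2.sublist List.filter_sublist) x).mp hx
        have hxt := List.mem_of_mem_filter hrec.1
        have hne : x.1 ≠ a.1 := by have := List.of_mem_filter hrec.1; simpa using this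
        refine ⟨List.mem_cons_of_mem _ hxt, ?_⟩
        intro y hy h1
        rcases List.mem_cons.mp hy with rfl | hy
        · exact absurd h1 (by omega)
        · exact hrec.2 y (List.mem_filter.mpr ⟨hy, by simp [h1, hne]⟩) h1
    · rintro ⟨hx, hmax⟩
      rcases List.mem_cons.mp hx with rfl | hx
      · exact List.mem_cons_self
      · by_cases hne : x.1 = a.1
        · -- x has a's start; maximality forces x = a
          have h1 := h.1 x hx
          simp only [pvLexLe] at h1
          have h2 := hmax a List.mem_cons_self hne.symm
          have hxa : x = a := Prod.ext (by omega) (by omega)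
          rw [hxa]
          exact List.mem_cons_self
        · refine List.mem_cons_of_mem _ ((pvFps_mem (t.filter (fun y => y.1 ≠ a.1))
            (h.2.sublist List.filter_sublist) x).mpr
            ⟨List.mem_filter.mpr ⟨hx, by simpa using hne⟩, ?_⟩)
          intro y hy h1
          exact hmax y (List.mem_cons_of_mem _ (List.mem_of_mem_filter hy)) h1
termination_by ys.length
decreasing_by all_goals exact Nat.lt_succ_of_le (List.length_filter_le _ _)

-- existence of a per-start maximum in a nonempty start group
lemma pvExists_max (l : List (Int × Int)) (s : Int) (h : ∃ y ∈ l, y.1 = s) :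
    ∃ v ∈ l, v.1 = s ∧ ∀ y ∈ l, y.1 = s → y.2 ≤ v.2 := by
  induction l with
  | nil => simp at h
  | cons a t ih =>
    by_cases ha : a.1 = s
    · by_cases ht : ∃ y ∈ t, y.1 = s
      · obtain ⟨v, hv, hvs, hvmax⟩ := ih ht
        by_cases hc : a.2 ≤ v.2
        · refine ⟨v, List.mem_cons_of_mem _ hv, hvs, ?_⟩
          intro y hy hys
          rcases List.mem_cons.mp hy with rfl | hy
          · exact hc
          · exact hvmax y hy hys
        · refine ⟨a, List.mem_cons_self, ha, ?_⟩
          intro y hy hys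
          rcases List.mem_cons.mp hy with rfl | hy
          · exact le_refl _
          · exact le_trans (hvmax y hy hys) (by omega)
      · refine ⟨a, List.mem_cons_self, ha, ?_⟩
        intro y hy hys
        rcases List.mem_cons.mp hy with rfl | hy
        · exact le_refl _
        · exact absurd ⟨y, hy, hys⟩ ht
    · obtain ⟨y, hy, hys⟩ := h
      rcases List.mem_cons.mp hy with rfl | hy
      · exact absurd hys ha
      · obtain ⟨v, hv, hvs, hvmax⟩ := ih ⟨y, hy, hys⟩
        refine ⟨v, List.mem_cons_of_mem _ hv, hvs, ?_⟩
        intro z hz hzs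
        rcases List.mem_cons.mp hz with rfl | hz
        · exact absurd hzs ha
        · exact hvmax z hz hzs

-- dict invariant for A's first pass
def pvDictInv (l : List (Int × Int)) (d : PySem.Dict Int (Int × Int)) : Prop :=
  d.keys.Nodup ∧
  ∀ s v, d.get? s = some v ↔ (v ∈ l ∧ v.1 = s ∧ ∀ y ∈ l, y.1 = s → y.2 ≤ v.2)

lemma pvDictInv_step (pre : List (Int × Int)) (d : PySem.Dict Int (Int × Int))
    (h : pvDictInv pre d) (x : Int × Int) : pvDictInv (pre ++ [x]) (pvStepBest d x) := by
  obtain ⟨hnd, hspec⟩ := h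
  have hx : (x.1, x.2) = x := rfl
  cases hget : d.get? x.1 with
  | none =>
    rw [show pvStepBest d x = d.insert x.1 (x.1, x.2) from by unfold pvStepBest; rw [hget]]
    have hnomem : ∀ y ∈ pre, y.1 ≠ x.1 := by
      intro y hy heq
      obtain ⟨v, hv, hvs, hvmax⟩ := pvExists_max pre x.1 ⟨y, hy, heq⟩
      have h2 := (hspec x.1 v).mpr ⟨hv, hvs, hvmax⟩
      rw [hget] at h2
      simp at h2
    refine ⟨PySem.Dict.nodup_keys_insert _ _ _ hnd, ?_⟩
    intro s v
    rw [PySem.Dict.get?_insert]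
    by_cases hs : s = x.1
    · subst hs
      rw [if_pos rfl, hx]
      constructor
      · rintro h2; injection h2 with h2; subst h2
        refine ⟨List.mem_append_right _ List.mem_cons_self, rfl, ?_⟩
        intro y hy hys
        rcases List.mem_append.mp hy with hy | hy
        · exact absurd hys (hnomem y hy)
        · simp at hy; subst hy; exact le_refl _
      · rintro ⟨hv, hvs, _⟩
        rcases List.mem_append.mp hv with hv | hv
        · exact absurd hvs (hnomem v hv)
        · simp at hv; subst hv; rfl
    · rw [if_neg hs, hspec s v]
      constructor
      · rintro ⟨hv, hvs, hvmax⟩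
        refine ⟨List.mem_append_left _ hv, hvs, ?_⟩
        intro y hy hys
        rcases List.mem_append.mp hy with hy | hy
        · exact hvmax y hy hys
        · simp at hy; subst hy; exact absurd hys (fun he => hs he.symm)
      · rintro ⟨hv, hvs, hvmax⟩
        rcases List.mem_append.mp hv with hv | hv
        · exact ⟨hv, hvs, fun y hy hys => hvmax y (List.mem_append_left _ hy) hys⟩
        · simp at hv; subst hv; exact absurd hvs.symm hs
  | some cur =>
    rw [show pvStepBest d x = if x.2 - x.1 > cur.2 - cur.1 ∨ (x.2 - x.1 = cur.2 - cur.1 ∧ x.2 > cur.2)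
        then d.insert x.1 (x.1, x.2) else d from by unfold pvStepBest; rw [hget]]
    have hcur := (hspec x.1 cur).mp hget
    obtain ⟨hcmem, hcs, hcmax⟩ := hcur
    by_cases hc : x.2 - x.1 > cur.2 - cur.1 ∨ (x.2 - x.1 = cur.2 - cur.1 ∧ x.2 > cur.2)
    · rw [if_pos hc]
      have hgt : cur.2 < x.2 := by omega
      refine ⟨PySem.Dict.nodup_keys_insert _ _ _ hnd, ?_⟩
      intro s v
      rw [PySem.Dict.get?_insert]
      by_cases hs : s = x.1
      · subst hs
        rw [if_pos rfl, hx]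
        constructor
        · rintro h2; injection h2 with h2; subst h2
          refine ⟨List.mem_append_right _ List.mem_cons_self, rfl, ?_⟩
          intro y hy hys
          rcases List.mem_append.mp hy with hy | hy
          · exact le_trans (hcmax y hy hys) (le_of_lt hgt)
          · simp at hy; subst hy; exact le_refl _
        · rintro ⟨hv, hvs, hvmax⟩
          rcases List.mem_append.mp hv with hv | hv
          · have h1 := hcmax v hv hvs
            have h3 : x.2 ≤ v.2 := hvmax x (List.mem_append_right _ List.mem_cons_self) rfl
            exact absurd h3 (by omega)
          · simp at hv; subst hv; rfl
      · rw [if_neg hs, hspec s v]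
        constructor
        · rintro ⟨hv, hvs, hvmax⟩
          refine ⟨List.mem_append_left _ hv, hvs, ?_⟩
          intro y hy hys
          rcases List.mem_append.mp hy with hy | hy
          · exact hvmax y hy hys
          · simp at hy; subst hy; exact absurd hys (fun he => hs he.symm)
        · rintro ⟨hv, hvs, hvmax⟩
          rcases List.mem_append.mp hv with hv | hv
          · exact ⟨hv, hvs, fun y hy hys => hvmax y (List.mem_append_left _ hy) hys⟩
          · simp at hv; subst hv; exact absurd hvs.symm hs
    · rw [if_neg hc]
      have hle : x.2 ≤ cur.2 := by omega
      refine ⟨hnd, ?_⟩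
      intro s v
      rw [hspec s v]
      by_cases hs : s = x.1
      · subst hs
        constructor
        · rintro ⟨hv, hvs, hvmax⟩
          refine ⟨List.mem_append_left _ hv, hvs, ?_⟩
          intro y hy hys
          rcases List.mem_append.mp hy with hy | hy
          · exact hvmax y hy hys
          · simp at hy; subst hy
            have h3 := hcmax v hv hvs
            have h4 := hvmax cur hcmem hcs
            omega
        · rintro ⟨hv, hvs, hvmax⟩
          rcases List.mem_append.mp hv with hv | hv
          · exact ⟨hv, hvs, fun y hy hys => hvmax y (List.mem_append_left _ hy) hys⟩
          · simp at hv
            -- v = x: maximality over pre ++ [x] forces v = cur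
            have h1 : cur.2 ≤ v.2 := hvmax cur (List.mem_append_left _ hcmem) hcs
            have h2 : v = cur := by
              apply Prod.ext
              · rw [hv, hcs]
              · have h5 : v.2 = x.2 := by rw [hv]
                omega
            rw [h2]; exact ⟨hcmem, hcs, hcmax⟩
      · constructor
        · rintro ⟨hv, hvs, hvmax⟩
          refine ⟨List.mem_append_left _ hv, hvs, ?_⟩
          intro y hy hys
          rcases List.mem_append.mp hy with hy | hy
          · exact hvmax y hy hys
          · simp at hy; subst hy; exact absurd hys (fun he => hs he.symm)
        · rintro ⟨hv, hvs, hvmax⟩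
          rcases List.mem_append.mp hv with hv | hv
          · exact ⟨hv, hvs, fun y hy hys => hvmax y (List.mem_append_left _ hy) hys⟩
          · simp at hv; subst hv; exact absurd hvs.symm hs

lemma pvDictInv_foldl (l pre : List (Int × Int)) (d : PySem.Dict Int (Int × Int))
    (h : pvDictInv pre d) : pvDictInv (pre ++ l) (l.foldl pvStepBest d) := by
  induction l generalizing pre d with
  | nil => simpa using h
  | cons x t ih =>
    have := ih (pre ++ [x]) (pvStepBest d x) (pvDictInv_step pre d h x)
    simpa using this

lemma pvDict_spec (spans : List (Int × Int)) :
    pvDictInv spans (spans.foldl pvStepBest PySem.Dict.empty) := by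
  have h0 : pvDictInv [] PySem.Dict.empty := by
    unfold pvDictInv
    refine ⟨by rw [PySem.Dict.keys_empty]; exact List.nodup_nil, ?_⟩
    intro s v
    simp [PySem.Dict.get?_empty]
  simpa using pvDictInv_foldl spans [] PySem.Dict.empty h0

lemma pvItem_fst (l : List (Int × Int)) (d : PySem.Dict Int (Int × Int))
    (h : pvDictInv l d) : ∀ kv ∈ d.items, kv.2.1 = kv.1 := by
  intro kv hkv
  have := (PySem.Dict.get?_eq_some_iff_mem_items d kv.1 kv.2 h.1).mpr hkv
  exact ((h.2 kv.1 kv.2).mp this).2.1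

lemma pvValues_mem (l : List (Int × Int)) (d : PySem.Dict Int (Int × Int))
    (h : pvDictInv l d) (x : Int × Int) :
    x ∈ d.values ↔ (x ∈ l ∧ ∀ y ∈ l, y.1 = x.1 → y.2 ≤ x.2) := by
  constructor
  · intro hx
    simp only [PySem.Dict.values, List.mem_map] at hx
    obtain ⟨kv, hkv, rfl⟩ := hx
    have h1 := (PySem.Dict.get?_eq_some_iff_mem_items d kv.1 kv.2 h.1).mpr hkv
    have hs := (h.2 kv.1 kv.2).mp h1
    exact ⟨hs.1, hs.2.1 ▸ hs.2.2⟩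
  · rintro ⟨hx, hmax⟩
    have h1 := (h.2 x.1 x).mpr ⟨hx, rfl, hmax⟩
    have hm := PySem.Dict.mem_items_of_get?_eq_some d h1
    simp only [PySem.Dict.values, List.mem_map]
    exact ⟨(x.1, x), hm, rfl⟩

lemma pvValues_nodup (l : List (Int × Int)) (d : PySem.Dict Int (Int × Int))
    (h : pvDictInv l d) : d.values.Nodup := by
  have hitems : d.items.Nodup := List.Nodup.of_map _ h.1
  refine List.Nodup.map_on ?_ hitems
  intro kv hkv kv' hkv' heq
  have h1 := pvItem_fst l d h kv hkv
  have h2 := pvItem_fst l d h kv' hkv'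
  have h3 : kv.1 = kv'.1 := by rw [← h1, ← h2, heq]
  exact Prod.ext h3 heq

lemma pvValues_map_fst (l : List (Int × Int)) (d : PySem.Dict Int (Int × Int))
    (h : pvDictInv l d) : (d.values.map (fun v => v.1)).Nodup := by
  have h1 : d.values.map (fun v => v.1) = d.keys := by
    simp only [PySem.Dict.values, PySem.Dict.keys, List.map_map]
    exact List.map_congr_left (fun kv hkv => pvItem_fst l d h kv hkv)
  rw [h1]; exact h.1

-- strictly start-sorted lists that are permutations of each other are equal
lemma pvEq_of_perm_strict (l1 l2 : List (Int × Int)) (hp : l1.Perm l2)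
    (h1 : l1.Pairwise (fun a b => a.1 < b.1)) (h2 : l2.Pairwise (fun a b => a.1 < b.1)) :
    l1 = l2 :=
  List.Perm.eq_of_pairwise (fun _ _ _ _ hab hba => absurd hba (by omega)) h1 h2 hp

lemma pvNodup_of_strict (l : List (Int × Int)) (h : l.Pairwise (fun a b => a.1 < b.1)) :
    l.Nodup :=
  h.imp (fun hab => by intro he; subst he; omega)

-- A's sorted candidate list IS pvFps of B's sorted list
lemma pvCandidates_eq (spans : List (Int × Int)) :
    PySem.List.sorted2 (decode_longest_per_start spans) (fun sp => sp.1) (fun sp => -sp.2)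
      = pvFps (PySem.List.sorted2 spans (fun sp => sp.1) (fun sp => -sp.2)) := by
  set d := spans.foldl pvStepBest PySem.Dict.empty with hd
  have hinv := pvDict_spec spans
  rw [← hd] at hinv
  have hV : decode_longest_per_start spans = d.values := by
    unfold decode_longest_per_start
    rw [← hd]
    exact PySem.Set.ofList_eq_self_of_nodup _ (pvValues_nodup _ _ hinv)
  set S := PySem.List.sorted2 spans (fun sp => sp.1) (fun sp => -sp.2) with hS
  set L := PySem.List.sorted2 (decode_longest_per_start spans) (fun sp => sp.1) (fun sp => -sp.2)
    with hL
  have hSperm : S.Perm spans := PySem.List.sorted2_perm _ _ _ _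
  have hLperm : L.Perm (decode_longest_per_start spans) := PySem.List.sorted2_perm _ _ _ _
  have hLlex : L.Pairwise pvLexLe := pvSorted2_pairwise _
  have hLfst : (L.map (fun v => v.1)).Nodup := by
    refine (List.Perm.nodup_iff (List.Perm.map _ hLperm)).mpr ?_
    rw [hV]; exact pvValues_map_fst _ _ hinv
  have hLstrict : L.Pairwise (fun a b => a.1 < b.1) := by
    have hne : L.Pairwise (fun a b => a.1 ≠ b.1) := by
      simpa [List.Nodup, List.pairwise_map] using hLfst
    refine (hLlex.and hne).imp fun {a b} hab => ?_
    obtain ⟨h1, h2⟩ := hab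
    simp only [pvLexLe] at h1
    omega
  have hSlex : S.Pairwise pvLexLe := pvSorted2_pairwise _
  have hFstrict := pvFps_pairwise S hSlex
  refine pvEq_of_perm_strict _ _ ?_ hLstrict hFstrict
  rw [List.perm_ext_iff_of_nodup (pvNodup_of_strict _ hLstrict) (pvNodup_of_strict _ hFstrict)]
  intro x
  rw [pvFps_mem S hSlex x]
  have hmemS : ∀ y : Int × Int, y ∈ S ↔ y ∈ spans := fun y => hSperm.mem_iff
  have hmemL : x ∈ L ↔ x ∈ d.values := by rw [hLperm.mem_iff, hV]
  rw [hmemL, pvValues_mem _ _ hinv]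
  constructor
  · rintro ⟨h1, h2⟩
    exact ⟨(hmemS x).mpr h1, fun y hy => h2 y ((hmemS y).mp hy)⟩
  · rintro ⟨h1, h2⟩
    exact ⟨(hmemS x).mp h1, fun y hy => h2 y ((hmemS y).mpr hy)⟩

-- skipping an element below current_end does not change the A-greedy run
lemma pvSkip (sp : Int × Int) (l : List (Int × Int)) (acc : List (Int × Int)) (ce : Int)
    (h : sp.1 < ce) : (sp :: l).foldl pvStepA (acc, ce) = l.foldl pvStepA (acc, ce) := by
  rw [List.foldl_cons]
  congr 1
  simp [pvStepA, h]

lemma pvFilter_irrelevant (t : List (Int × Int)) (h : t.Pairwise (fun a b => a.1 ≤ b.1))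
    (s : Int) (acc : List (Int × Int)) (ce : Int) (hs : s < ce) (hall : ∀ y ∈ t, s ≤ y.1) :
    (pvFps (t.filter (fun y => y.1 ≠ s))).foldl pvStepA (acc, ce)
      = (pvFps t).foldl pvStepA (acc, ce) := by
  match t with
  | [] => rfl
  | z :: t' =>
    rw [List.pairwise_cons] at h
    by_cases hz : z.1 = s
    · rw [show (z :: t').filter (fun y => y.1 ≠ s) = t'.filter (fun y => y.1 ≠ s) from by
        simp [hz]]
      rw [pvFps_cons, pvSkip z _ acc ce (hz ▸ hs), hz]
    · have hall2 : ∀ y ∈ z :: t', (fun (y : Int × Int) => decide (y.1 ≠ s)) y = true := by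
        intro y hy
        rcases List.mem_cons.mp hy with rfl | hy
        · simp [hz]
        · have h1 := h.1 y hy
          have h2 := hall z List.mem_cons_self
          simp only [decide_eq_true_eq]
          omega
      rw [List.filter_eq_self.mpr hall2]

-- B's single scan = A's greedy scan over the first-per-start sublist
lemma pvScan_eq (ys : List (Int × Int)) (h : ys.Pairwise (fun a b => a.1 ≤ b.1)) :
    ∀ (acc : List (Int × Int)) (ce : Int) (ls : Option Int),
      (∀ t0, ls = some t0 → ∀ y ∈ ys, t0 ≤ y.1) →
      (ys.foldl pvStepB (acc, ce, ls)).1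
        = ((pvFps (ys.filter (fun y => some y.1 ≠ ls))).foldl pvStepA (acc, ce)).1 := by
  induction ys with
  | nil => intro acc ce ls _; rw [List.filter_nil, pvFps_nil]; rfl
  | cons x t ih =>
    intro acc ce ls hls
    rw [List.pairwise_cons] at h
    have hallt : ∀ y ∈ t, x.1 ≤ y.1 := h.1
    by_cases hlx : some x.1 = ls
    · -- x is dropped by the filter, and B skips it
      have hstep : pvStepB (acc, ce, ls) x = (acc, ce, ls) := by
        simp [pvStepB, hlx]
      rw [List.foldl_cons, hstep]
      rw [show (x :: t).filter (fun y => some y.1 ≠ ls) = t.filter (fun y => some y.1 ≠ ls) from by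
        simp [hlx]]
      exact ih h.2 acc ce ls (fun t0 ht0 y hy => hls t0 ht0 y (List.mem_cons_of_mem _ hy))
    · -- x survives the filter
      have hmerge : (t.filter (fun y => some y.1 ≠ ls)).filter (fun y => y.1 ≠ x.1)
          = t.filter (fun y => y.1 ≠ x.1) := by
        rw [List.filter_filter]
        apply List.filter_congr
        intro y hy
        by_cases hy1 : y.1 = x.1
        · simp [hy1]
        · have hok : some y.1 ≠ ls := by
            intro he
            cases ls with
            | none => simp at he
            | some t0 =>
              have h1 := hls t0 rfl x List.mem_cons_self
              have h2 := hallt y hy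
              injection he with he
              omega
          simp [hy1, hok]
      have hexp : pvFps ((x :: t).filter (fun y => some y.1 ≠ ls))
          = x :: pvFps (t.filter (fun y => y.1 ≠ x.1)) := by
        rw [show (x :: t).filter (fun y => some y.1 ≠ ls)
            = x :: t.filter (fun y => some y.1 ≠ ls) from by simp [hlx]]
        rw [pvFps_cons, hmerge]
      by_cases hce : x.1 < ce
      · -- both sides skip x
        have hstep : pvStepB (acc, ce, ls) x = (acc, ce, ls) := by
          simp [pvStepB, hce]
        rw [List.foldl_cons, hstep, hexp, pvSkip x _ acc ce hce]
        rw [ih h.2 acc ce ls (fun t0 ht0 y hy => hls t0 ht0 y (List.mem_cons_of_mem _ hy))]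
        have hirr := pvFilter_irrelevant (t.filter (fun y => some y.1 ≠ ls))
          (h.2.sublist List.filter_sublist) x.1 acc ce hce
          (fun y hy => hallt y (List.mem_of_mem_filter hy))
        rw [hmerge] at hirr
        rw [← hirr]
      · -- both sides select x
        have hstep : pvStepB (acc, ce, ls) x = (acc ++ [x], x.2, some x.1) := by
          simp [pvStepB, hce, hlx]
        have hstepA : pvStepA (acc, ce) x = (acc ++ [x], x.2) := by
          simp [pvStepA, hce]
        rw [List.foldl_cons, hstep, hexp, List.foldl_cons, hstepA]
        rw [ih h.2 (acc ++ [x]) x.2 (some x.1)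
          (fun t0 ht0 y hy => by injection ht0 with ht0; exact ht0 ▸ hallt y hy)]
        have hps : t.filter (fun y => some y.1 ≠ some x.1) = t.filter (fun y => y.1 ≠ x.1) := by
          apply List.filter_congr
          intro y _
          simp
        rw [hps]

-- ===== VERDICT (by name: the statement is the Claim_ definition above) =====
theorem decode_maximal_non_overlapping_py_spec : Claim_equal_decode_maximal_non_overlapping_py := by
  intro spans _
  unfold Spec_decode_maximal_non_overlapping_py
  unfold decode_maximal_non_overlapping_py decode_maximal_non_overlapping_py_alt
  have hSle : (PySem.List.sorted2 spans (fun sp => sp.1) (fun sp => -sp.2)).Pairwise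
      (fun a b => a.1 ≤ b.1) := by
    refine (pvSorted2_pairwise spans).imp fun {a b} hab => ?_
    simp only [pvLexLe] at hab
    omega
  have h1 := pvScan_eq _ hSle [] (-1) none (by simp)
  have h2 : (PySem.List.sorted2 spans (fun sp => sp.1) (fun sp => -sp.2)).filter
      (fun y => some y.1 ≠ (none : Option Int))
      = PySem.List.sorted2 spans (fun sp => sp.1) (fun sp => -sp.2) := by
    apply List.filter_eq_self.mpr
    intro y _
    simp
  rw [h2] at h1
  rw [pvCandidates_eq spans]
  simp only [h1]
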